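-- pv_equiv track=rewrite | github.com/aw4630/trailblaze | Buildathon-main/test_itinerary_validator.py | _format_feedback_for_openai
-- ===== SOURCE A (Python) =====
-- def _format_feedback_for_openai(verification_result):
--     """Format the verification results into clear instructions for OpenAI to use in a retry"""
--     feedback = []
--
--     # Format issue categories
--     if verification_result["details"].get("format", {}).get("issues"):
--         feedback.append("FORMAT ISSUES:")
--         for issue in verification_result["details"]["format"]["issues"]:
--             feedback.append(f"- {issue}")
--         feedback.append("Please fix the JSON format issues above first.\n")
--
--     if verification_result["details"].get("venue_hours", {}).get("issues"):
--         feedback.append("VENUE HOURS ISSUES:")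
--         for issue in verification_result["details"]["venue_hours"]["issues"]:
--             feedback.append(f"- {issue}")
--         feedback.append("Please adjust event times to occur within venue operating hours.\n")
--
--     if verification_result["details"].get("travel_times", {}).get("issues"):
--         feedback.append("TRAVEL TIME ISSUES:")
--         for issue in verification_result["details"]["travel_times"]["issues"]:
--             feedback.append(f"- {issue}")
--         feedback.append("Please allow more time between events or choose venues closer together.\n")
--
--     if verification_result["details"].get("activity_durations", {}).get("issues"):
--         feedback.append("ACTIVITY DURATION ISSUES:")
--         for issue in verification_result["details"]["activity_durations"]["issues"]:
--             feedback.append(f"- {issue}")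
--         feedback.append("Please adjust event durations to be more realistic.\n")
--
--     if verification_result["details"].get("buffer_times", {}).get("issues"):
--         feedback.append("BUFFER TIME ISSUES:")
--         for issue in verification_result["details"]["buffer_times"]["issues"]:
--             feedback.append(f"- {issue}")
--         feedback.append("Please ensure events don't overlap and have sufficient buffer times.\n")
--
--     if verification_result["details"].get("overall_timing", {}).get("issues"):
--         feedback.append("OVERALL TIMING ISSUES:")
--         for issue in verification_result["details"]["overall_timing"]["issues"]:
--             feedback.append(f"- {issue}")
--         feedback.append("Please adjust the overall timing of the itinerary.\n")
--
--     # Add general guidance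
--     feedback.append("GENERAL GUIDANCE:")
--     feedback.append("- Ensure all events have valid ISO format dates and times (YYYY-MM-DDThh:mm:ss)")
--     feedback.append("- Broadway shows typically start at 7:00 PM or 8:00 PM and last about 2-3 hours")
--     feedback.append("- Restaurants in the Theater District typically open from 11:00 AM to 11:00 PM")
--     feedback.append("- Allow at least 30 minutes for travel between venues in Manhattan")
--     feedback.append("- Include pre-show dining with at least 1.5 hours before showtime")
--
--     return "\n".join(feedback)
-- ===== SOURCE B (Python) =====
-- _SECTIONS = (
--     ("format", "FORMAT ISSUES:", "Please fix the JSON format issues above first.\n"),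
--     ("venue_hours", "VENUE HOURS ISSUES:", "Please adjust event times to occur within venue operating hours.\n"),
--     ("travel_times", "TRAVEL TIME ISSUES:", "Please allow more time between events or choose venues closer together.\n"),
--     ("activity_durations", "ACTIVITY DURATION ISSUES:", "Please adjust event durations to be more realistic.\n"),
--     ("buffer_times", "BUFFER TIME ISSUES:", "Please ensure events don't overlap and have sufficient buffer times.\n"),
--     ("overall_timing", "OVERALL TIMING ISSUES:", "Please adjust the overall timing of the itinerary.\n"),
-- )
--
-- _GUIDANCE = (
--     "GENERAL GUIDANCE:\n"
--     "- Ensure all events have valid ISO format dates and times (YYYY-MM-DDThh:mm:ss)\n"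
--     "- Broadway shows typically start at 7:00 PM or 8:00 PM and last about 2-3 hours\n"
--     "- Restaurants in the Theater District typically open from 11:00 AM to 11:00 PM\n"
--     "- Allow at least 30 minutes for travel between venues in Manhattan\n"
--     "- Include pre-show dining with at least 1.5 hours before showtime"
-- )
--
--
-- def _format_feedback_for_openai(verification_result):
--     """Format the verification results into clear instructions for OpenAI to use in a retry"""
--     details = verification_result["details"]
--
--     def render(specs):
--         # builds the list of fully-formatted text chunks back-to-front,
--         # the fixed guidance chunk as the recursion's base case
--         if not specs:
--             return [_GUIDANCE]
--         key, title, advice = specs[0]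
--         rest = render(specs[1:])
--         issues = details.get(key, {}).get("issues")
--         if not issues:
--             return rest
--         chunk = "\n".join([title] + [f"- {i}" for i in issues] + [advice])
--         return [chunk] + rest
--
--     return "\n".join(render(_SECTIONS))
-- ===== Notes on version B (the rewrite author's own statement) =====
-- stated objective: alternative
-- what changed: Replaces A's six unrolled append-to-a-flat-line-list blocks by a recursive back-to-front construction that builds each section as one pre-joined text chunk (guidance as a single literal base case) and joins the chunks once.
import Mathlib
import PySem

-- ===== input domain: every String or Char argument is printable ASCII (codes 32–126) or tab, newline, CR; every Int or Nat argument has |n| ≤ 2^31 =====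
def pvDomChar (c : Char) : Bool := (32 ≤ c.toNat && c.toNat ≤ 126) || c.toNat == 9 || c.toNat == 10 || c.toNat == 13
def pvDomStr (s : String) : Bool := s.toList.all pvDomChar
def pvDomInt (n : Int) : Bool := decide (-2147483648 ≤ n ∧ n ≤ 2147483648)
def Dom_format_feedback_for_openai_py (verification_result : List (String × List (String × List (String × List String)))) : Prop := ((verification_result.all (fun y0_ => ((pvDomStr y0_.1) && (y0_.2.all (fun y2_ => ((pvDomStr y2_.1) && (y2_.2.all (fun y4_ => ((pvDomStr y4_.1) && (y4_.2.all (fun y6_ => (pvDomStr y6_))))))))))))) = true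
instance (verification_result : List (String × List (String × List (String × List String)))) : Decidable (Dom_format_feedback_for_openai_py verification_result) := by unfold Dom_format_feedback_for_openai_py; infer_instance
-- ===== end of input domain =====

-- B rebuilds the text recursively back-to-front, one pre-joined chunk per section with the guidance
-- literal as the base case, instead of A's six unrolled appends to one flat line list; same return value.

-- ===== PORT A =====
-- Literal transliteration: six unrolled blocks, each testing details.get(key, {}).get("issues") for truthiness,
-- then a for-loop appending "- {issue}" (ported as a foldl over the same list), then the footer; then the five
-- general-guidance lines; "\n".join via PySem.Str.join.
def format_feedback_for_openai_py (verification_result : List (String × List (String × List (String × List String)))) : String :=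
  let details := PySem.Dict.getD (PySem.Dict.mk verification_result) "details" []
  let fb : List String := []
  let fb := match PySem.Dict.get? (PySem.Dict.mk (PySem.Dict.getD (PySem.Dict.mk details) "format" [])) "issues" with
    | some issues => if issues.isEmpty then fb else
        (List.foldl (fun a i => a ++ ["- " ++ i]) (fb ++ ["FORMAT ISSUES:"]) issues) ++ ["Please fix the JSON format issues above first.\n"]
    | none => fb
  let fb := match PySem.Dict.get? (PySem.Dict.mk (PySem.Dict.getD (PySem.Dict.mk details) "venue_hours" [])) "issues" with
    | some issues => if issues.isEmpty then fb else
        (List.foldl (fun a i => a ++ ["- " ++ i]) (fb ++ ["VENUE HOURS ISSUES:"]) issues) ++ ["Please adjust event times to occur within venue operating hours.\n"]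
    | none => fb
  let fb := match PySem.Dict.get? (PySem.Dict.mk (PySem.Dict.getD (PySem.Dict.mk details) "travel_times" [])) "issues" with
    | some issues => if issues.isEmpty then fb else
        (List.foldl (fun a i => a ++ ["- " ++ i]) (fb ++ ["TRAVEL TIME ISSUES:"]) issues) ++ ["Please allow more time between events or choose venues closer together.\n"]
    | none => fb
  let fb := match PySem.Dict.get? (PySem.Dict.mk (PySem.Dict.getD (PySem.Dict.mk details) "activity_durations" [])) "issues" with
    | some issues => if issues.isEmpty then fb else
        (List.foldl (fun a i => a ++ ["- " ++ i]) (fb ++ ["ACTIVITY DURATION ISSUES:"]) issues) ++ ["Please adjust event durations to be more realistic.\n"]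
    | none => fb
  let fb := match PySem.Dict.get? (PySem.Dict.mk (PySem.Dict.getD (PySem.Dict.mk details) "buffer_times" [])) "issues" with
    | some issues => if issues.isEmpty then fb else
        (List.foldl (fun a i => a ++ ["- " ++ i]) (fb ++ ["BUFFER TIME ISSUES:"]) issues) ++ ["Please ensure events don't overlap and have sufficient buffer times.\n"]
    | none => fb
  let fb := match PySem.Dict.get? (PySem.Dict.mk (PySem.Dict.getD (PySem.Dict.mk details) "overall_timing" [])) "issues" with
    | some issues => if issues.isEmpty then fb else
        (List.foldl (fun a i => a ++ ["- " ++ i]) (fb ++ ["OVERALL TIMING ISSUES:"]) issues) ++ ["Please adjust the overall timing of the itinerary.\n"]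
    | none => fb
  let fb := fb ++ ["GENERAL GUIDANCE:",
    "- Ensure all events have valid ISO format dates and times (YYYY-MM-DDThh:mm:ss)",
    "- Broadway shows typically start at 7:00 PM or 8:00 PM and last about 2-3 hours",
    "- Restaurants in the Theater District typically open from 11:00 AM to 11:00 PM",
    "- Allow at least 30 minutes for travel between venues in Manhattan",
    "- Include pre-show dining with at least 1.5 hours before showtime"]
  PySem.Str.join "\n" fb

-- ===== PORT B =====
-- B's section table (module-level _SECTIONS) and the single guidance literal (_GUIDANCE).
def pvSections : List (String × String × String) :=
  [("format", "FORMAT ISSUES:", "Please fix the JSON format issues above first.\n"),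
   ("venue_hours", "VENUE HOURS ISSUES:", "Please adjust event times to occur within venue operating hours.\n"),
   ("travel_times", "TRAVEL TIME ISSUES:", "Please allow more time between events or choose venues closer together.\n"),
   ("activity_durations", "ACTIVITY DURATION ISSUES:", "Please adjust event durations to be more realistic.\n"),
   ("buffer_times", "BUFFER TIME ISSUES:", "Please ensure events don't overlap and have sufficient buffer times.\n"),
   ("overall_timing", "OVERALL TIMING ISSUES:", "Please adjust the overall timing of the itinerary.\n")]

def pvGuidance : String :=
  "GENERAL GUIDANCE:\n- Ensure all events have valid ISO format dates and times (YYYY-MM-DDThh:mm:ss)\n- Broadway shows typically start at 7:00 PM or 8:00 PM and last about 2-3 hours\n- Restaurants in the Theater District typically open from 11:00 AM to 11:00 PM\n- Allow at least 30 minutes for travel between venues in Manhattan\n- Include pre-show dining with at least 1.5 hours before showtime"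

-- render(specs): recursive, base case [_GUIDANCE]; a present section becomes ONE pre-joined chunk.
def pvRender (details : List (String × List (String × List String))) : List (String × String × String) → List String
  | [] => [pvGuidance]
  | sec :: rest =>
    let r := pvRender details rest
    match PySem.Dict.get? (PySem.Dict.mk (PySem.Dict.getD (PySem.Dict.mk details) sec.1 [])) "issues" with
    | some issues =>
        if issues.isEmpty then r
        else PySem.Str.join "\n" (sec.2.1 :: (issues.map (fun i => "- " ++ i) ++ [sec.2.2])) :: r
    | none => r

def format_feedback_for_openai_py_alt (verification_result : List (String × List (String × List (String × List String)))) : String :=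
  let details := PySem.Dict.getD (PySem.Dict.mk verification_result) "details" []
  PySem.Str.join "\n" (pvRender details pvSections)

-- ===== PRECONDITION & SPEC =====
-- Pre_ excludes only inputs with no "details" key, on which the Python A (and B) raise KeyError.
def Pre_format_feedback_for_openai_py (verification_result : List (String × List (String × List (String × List String)))) : Prop :=
  (verification_result.any (fun p => p.1 == "details")) = true
instance (verification_result : List (String × List (String × List (String × List String)))) : Decidable (Pre_format_feedback_for_openai_py verification_result) := by unfold Pre_format_feedback_for_openai_py; infer_instance
def pvWitness_format_feedback_for_openai_py : (List (String × List (String × List (String × List String)))) := [("details", [("format", [("issues", ["bad json"])])])]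
def Spec_format_feedback_for_openai_py (verification_result : List (String × List (String × List (String × List String)))) (out : String) : Prop := out = format_feedback_for_openai_py_alt verification_result
instance (verification_result : List (String × List (String × List (String × List String)))) (out : String) : Decidable (Spec_format_feedback_for_openai_py verification_result out) := by unfold Spec_format_feedback_for_openai_py; infer_instance

-- ===== CLAIM (what is proved, stated in full; the proofs are below) =====
def Claim_equal_format_feedback_for_openai_py : Prop := ∀ (verification_result : List (String × List (String × List (String × List String)))), Dom_format_feedback_for_openai_py verification_result → Pre_format_feedback_for_openai_py verification_result → Spec_format_feedback_for_openai_py verification_result (format_feedback_for_openai_py verification_result)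

-- ===== LEMMAS AND PROOFS =====

-- the guidance block as A's six separate lines
def pvGLines : List String :=
  ["GENERAL GUIDANCE:",
   "- Ensure all events have valid ISO format dates and times (YYYY-MM-DDThh:mm:ss)",
   "- Broadway shows typically start at 7:00 PM or 8:00 PM and last about 2-3 hours",
   "- Restaurants in the Theater District typically open from 11:00 AM to 11:00 PM",
   "- Allow at least 30 minutes for travel between venues in Manhattan",
   "- Include pre-show dining with at least 1.5 hours before showtime"]

-- the lines a section contributes to A's flat list
def pvLines (details : List (String × List (String × List String))) (sec : String × String × String) : List String :=
  match PySem.Dict.get? (PySem.Dict.mk (PySem.Dict.getD (PySem.Dict.mk details) sec.1 [])) "issues" with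
  | some issues => if issues.isEmpty then [] else sec.2.1 :: (issues.map (fun i => "- " ++ i) ++ [sec.2.2])
  | none => []

theorem pvJoinSingleton (s x : String) : PySem.Str.join s [x] = x := by
  simp [PySem.Str.join, PySem.Chars.join_singleton]

theorem pvJoinCons (s x : String) (ys : List String) (hy : ys ≠ []) :
    PySem.Str.join s (x :: ys) = x ++ s ++ PySem.Str.join s ys := by
  cases ys with
  | nil => exact absurd rfl hy
  | cons y t => simp [PySem.Str.join, PySem.Chars.join_cons_cons, String.append_assoc]

theorem pvJoinAppend (s : String) (xs ys : List String) (hx : xs ≠ []) (hy : ys ≠ []) :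
    PySem.Str.join s (xs ++ ys) = PySem.Str.join s xs ++ s ++ PySem.Str.join s ys := by
  induction xs with
  | nil => exact absurd rfl hx
  | cons x t ih =>
    cases t with
    | nil => simp [pvJoinSingleton, pvJoinCons s x ys hy]
    | cons z zs =>
      rw [List.cons_append, pvJoinCons s x ((z :: zs) ++ ys) (by simp),
          pvJoinCons s x (z :: zs) (by simp), ih (by simp)]
      simp [String.append_assoc]

set_option maxRecDepth 4000 in
theorem pvGuidance_eq : pvGuidance = PySem.Str.join "\n" pvGLines := by decide

theorem pvRender_ne_nil (details : List (String × List (String × List String)))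
    (secs : List (String × String × String)) : pvRender details secs ≠ [] := by
  induction secs with
  | nil => simp [pvRender]
  | cons sec rest ih =>
    simp only [pvRender]
    cases PySem.Dict.get? (PySem.Dict.mk (PySem.Dict.getD (PySem.Dict.mk details) sec.1 [])) "issues" with
    | none => exact ih
    | some issues =>
      dsimp only
      by_cases h : issues.isEmpty <;> simp [h, ih]

theorem pvRenderJoin (details : List (String × List (String × List String)))
    (secs : List (String × String × String)) :
    PySem.Str.join "\n" (pvRender details secs)
      = PySem.Str.join "\n" ((secs.map (pvLines details)).flatten ++ pvGLines) := by
  induction secs with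
  | nil => simp [pvRender, pvJoinSingleton, pvGuidance_eq]
  | cons sec rest ih =>
    simp only [pvRender, List.map_cons, List.flatten_cons, pvLines]
    cases PySem.Dict.get? (PySem.Dict.mk (PySem.Dict.getD (PySem.Dict.mk details) sec.1 [])) "issues" with
    | none => simpa using ih
    | some issues =>
      dsimp only
      by_cases h : issues.isEmpty
      · simpa [h] using ih
      · rw [if_neg h, if_neg h]
        rw [pvJoinCons _ _ _ (pvRender_ne_nil details rest), ih, List.append_assoc,
            pvJoinAppend "\n" (sec.2.1 :: (issues.map (fun i => "- " ++ i) ++ [sec.2.2]))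
              ((rest.map (pvLines details)).flatten ++ pvGLines) (by simp) (by simp [pvGLines])]

-- A's per-issue append loop equals a map.
theorem pvFoldlDash (l : List String) (acc : List String) :
    List.foldl (fun a i => a ++ ["- " ++ i]) acc l = acc ++ l.map (fun i => "- " ++ i) := by
  induction l generalizing acc with
  | nil => simp
  | cons x xs ih => simp [List.foldl, ih]

-- one unrolled block of A rewritten as "fb ++ lines-of-this-section"
theorem pvStepEq (fb : List String) (o : Option (List String)) (h f : String) :
    (match o with
     | some issues => if issues.isEmpty then fb else
         (List.foldl (fun a i => a ++ ["- " ++ i]) (fb ++ [h]) issues) ++ [f]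
     | none => fb)
    = fb ++ (match o with
     | some issues => if issues.isEmpty then [] else h :: (issues.map (fun i => "- " ++ i) ++ [f])
     | none => []) := by
  cases o with
  | none => simp
  | some issues =>
    dsimp only
    rw [pvFoldlDash]
    by_cases hi : issues.isEmpty
    · rw [if_pos hi, if_pos hi]; simp
    · rw [if_neg hi, if_neg hi]; simp

-- ===== VERDICT (by name: the statement is the Claim_ definition above) =====
theorem format_feedback_for_openai_py_spec : Claim_equal_format_feedback_for_openai_py := by
  intro vr _ _
  unfold Spec_format_feedback_for_openai_py format_feedback_for_openai_py format_feedback_for_openai_py_alt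
  rw [pvRenderJoin]
  simp only [pvSections, List.map_cons, List.map_nil, List.flatten_cons, List.flatten_nil, pvLines,
    pvGLines, pvStepEq]
  simp [List.append_assoc]
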